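-- pv_equiv track=rewrite | github.com/berkerpeksag/astor | tests/build_expressions.py | get_sub_combinations
-- ===== SOURCE A (Python) =====
-- import collections
--
-- def get_sub_combinations(maxop):
--     """Return a dictionary of lists of combinations suitable
--        for recursively building expressions.
--
--        Each dictionary key is a tuple of (numops, numoperands),
--        where:
--
--             numops is the number of operators we
--             should build an expression for
--
--             numterms is the number of operands required
--             by the current operator.
--
--         Each list contains all permutations of the number
--         of operators that the recursively called function
--         should use for each operand.
--     """
--     combo = collections.defaultdict(list)
--     for numops in range(maxop+1):
--         if numops:
--             combo[numops, 1].append((numops-1,))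
--         for op1 in range(numops):
--             combo[numops, 2].append((op1, numops - op1 - 1))
--             for op2 in range(numops - op1):
--                 combo[numops, 3].append((op1, op2, numops - op1 - op2 - 1))
--     return combo
-- ===== SOURCE B (Python) =====
-- import collections
--
--
-- def comps(m, k):
--     """Yield all k-tuples of nonnegative ints summing to m, lexicographically."""
--     if m < 0:
--         return
--     if k == 1:
--         yield (m,)
--         return
--     for i in range(m + 1):
--         for rest in comps(m - i, k - 1):
--             yield (i,) + rest
--
--
-- def get_sub_combinations(maxop):
--     """Return a dictionary of lists of combinations suitable
--        for recursively building expressions.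
--     """
--     combo = collections.defaultdict(list)
--     for numops in range(maxop + 1):
--         for numterms in (1, 2, 3):
--             for t in comps(numops - 1, numterms):
--                 combo[numops, numterms].append(t)
--     return combo
-- ===== Notes on version B (the rewrite author's own statement) =====
-- stated objective: alternative
-- what changed: Replaces A's single combined triple-nested loop (special-casing arity 1, 2 and 3 by hand) with a recursive generator comps(m,k) enumerating compositions of m into k nonnegative parts, driven by a uniform loop over numterms in (1,2,3).
import Mathlib
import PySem

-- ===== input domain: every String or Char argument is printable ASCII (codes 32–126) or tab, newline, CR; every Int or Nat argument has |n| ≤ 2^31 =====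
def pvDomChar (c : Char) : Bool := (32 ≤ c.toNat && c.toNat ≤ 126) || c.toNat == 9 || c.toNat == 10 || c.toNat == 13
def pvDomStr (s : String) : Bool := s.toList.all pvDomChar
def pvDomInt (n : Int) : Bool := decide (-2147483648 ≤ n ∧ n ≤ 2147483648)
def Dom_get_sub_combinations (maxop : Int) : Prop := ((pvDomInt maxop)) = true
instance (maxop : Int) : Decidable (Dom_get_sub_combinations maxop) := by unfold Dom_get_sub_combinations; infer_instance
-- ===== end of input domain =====

-- B replaces A's hand-specialised triple-nested loop with a recursive composition
-- enumerator comps(m,k) driven by a uniform loop over numterms (objective: alternative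
-- decomposition, same cost). The Python functions return a defaultdict; per the type
-- convention it is ported as its items association list (insertion order).

-- ===== PORT A =====
-- A's defaultdict(list): combo[key].append(v) is Dict.modify key [] (· ++ [v])
def get_sub_combinations (maxop : Int) : List (Int × Int × List (List Int)) :=
  (((PySem.List.pyRange 0 (maxop + 1) 1).foldl (fun combo numops =>
      let combo := if numops ≠ 0 then combo.modify (numops, 1) [] (· ++ [[numops - 1]]) else combo
      (PySem.List.pyRange 0 numops 1).foldl (fun combo op1 =>
        let combo := combo.modify (numops, 2) [] (· ++ [[op1, numops - op1 - 1]])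
        (PySem.List.pyRange 0 (numops - op1) 1).foldl (fun combo op2 =>
          combo.modify (numops, 3) [] (· ++ [[op1, op2, numops - op1 - op2 - 1]])) combo) combo)
      (PySem.Dict.empty : PySem.Dict (Int × Int) (List (List Int)))).items.map
    (fun p => (p.1.1, p.1.2, p.2)))

-- ===== PORT B =====
-- comps(m, k) of Source B; the guard 'k ≤ 1' coincides with Python's 'k == 1' for every
-- k ≥ 1, and B only calls comps with k ∈ {1,2,3} (for k ≤ 0 Python never terminates).
def comps (m k : Int) : List (List Int) :=
  if m < 0 then []
  else if k ≤ 1 then [[m]]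
  else (PySem.List.pyRange 0 (m + 1) 1).flatMap (fun i =>
    (comps (m - i) (k - 1)).map (fun rest => i :: rest))
termination_by k.toNat
decreasing_by omega

def get_sub_combinations_alt (maxop : Int) : List (Int × Int × List (List Int)) :=
  (((PySem.List.pyRange 0 (maxop + 1) 1).foldl (fun combo numops =>
      ([1, 2, 3] : List Int).foldl (fun combo numterms =>
        (comps (numops - 1) numterms).foldl (fun combo t =>
          combo.modify (numops, numterms) [] (· ++ [t])) combo) combo)
      (PySem.Dict.empty : PySem.Dict (Int × Int) (List (List Int)))).items.map
    (fun p => (p.1.1, p.1.2, p.2)))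

-- ===== PRECONDITION & SPEC =====
def Spec_get_sub_combinations (maxop : Int) (out : List (Int × Int × List (List Int))) : Prop := out = get_sub_combinations_alt maxop
instance (maxop : Int) (out : List (Int × Int × List (List Int))) : Decidable (Spec_get_sub_combinations maxop out) := by unfold Spec_get_sub_combinations; infer_instance

-- ===== CLAIM (what is proved, stated in full; the proofs are below) =====
def Claim_equal_get_sub_combinations : Prop := ∀ (maxop : Int), Dom_get_sub_combinations maxop → Spec_get_sub_combinations maxop (get_sub_combinations maxop)

-- ===== LEMMAS AND PROOFS =====

-- `app d l` : perform the defaultdict-appends listed in l, in order.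
def app (d : PySem.Dict (Int × Int) (List (List Int)))
    (l : List ((Int × Int) × List Int)) : PySem.Dict (Int × Int) (List (List Int)) :=
  l.foldl (fun d p => d.modify p.1 [] (· ++ [p.2])) d

theorem app_cons (d : PySem.Dict (Int × Int) (List (List Int))) (p : (Int × Int) × List Int)
    (l : List ((Int × Int) × List Int)) :
    app d (p :: l) = app (d.modify p.1 [] (· ++ [p.2])) l := rfl

theorem app_append (d : PySem.Dict (Int × Int) (List (List Int)))
    (l₁ l₂ : List ((Int × Int) × List Int)) :
    app d (l₁ ++ l₂) = app (app d l₁) l₂ := List.foldl_append ..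

-- two modifies at distinct keys commute when the moved key is already present
theorem mod_comm {κ ν : Type} [BEq κ] [LawfulBEq κ] (d : PySem.Dict κ ν) (k k' : κ)
    (d0 : ν) (f g : ν → ν) (hne : k ≠ k') (hk : d.contains k = true) :
    (d.modify k' d0 g).modify k d0 f = (d.modify k d0 f).modify k' d0 g := by
  have hgk : (d.modify k' d0 g).getD k d0 = d.getD k d0 :=
    PySem.Dict.getD_modify_of_ne d d0 g hne
  have hgk' : (d.modify k d0 f).getD k' d0 = d.getD k' d0 :=
    PySem.Dict.getD_modify_of_ne d d0 f (Ne.symm hne)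
  have hck : (d.modify k' d0 g).contains k = true := by
    rw [PySem.Dict.contains_modify, hk, Bool.or_true]
  apply PySem.Dict.ext
  by_cases hk' : d.contains k' = true
  · have hck' : (d.modify k d0 f).contains k' = true := by
      rw [PySem.Dict.contains_modify, hk', Bool.or_true]
    show ((d.modify k' d0 g).insert k _).items = ((d.modify k d0 f).insert k' _).items
    rw [PySem.Dict.items_insert_of_contains _ _ hck,
        PySem.Dict.items_insert_of_contains _ _ hck', hgk, hgk']
    show List.map _ ((d.insert k' _).items) = List.map _ ((d.insert k _).items)
    rw [PySem.Dict.items_insert_of_contains _ _ hk',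
        PySem.Dict.items_insert_of_contains _ _ hk, List.map_map, List.map_map]
    refine List.map_congr_left (fun p _ => ?_)
    simp only [Function.comp_apply]
    by_cases h1 : p.1 = k <;> by_cases h2 : p.1 = k' <;>
      simp_all [beq_iff_eq, Ne.symm hne]
  · have hfk' : d.contains k' = false := by simpa using hk'
    have hck' : (d.modify k d0 f).contains k' = false := by
      rw [PySem.Dict.contains_modify, hfk']
      simp [Ne.symm hne]
    show ((d.modify k' d0 g).insert k _).items = ((d.modify k d0 f).insert k' _).items
    rw [PySem.Dict.items_insert_of_contains _ _ hck,
        PySem.Dict.items_insert_of_not_contains _ _ hck', hgk, hgk']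
    show List.map _ ((d.insert k' _).items) = ((d.insert k _).items) ++ _
    rw [PySem.Dict.items_insert_of_not_contains _ _ hfk',
        PySem.Dict.items_insert_of_contains _ _ hk, List.map_append]
    simp [beq_iff_eq, Ne.symm hne]

-- a present-key operation moves left past operations on other keys
theorem app_snoc_comm (d : PySem.Dict (Int × Int) (List (List Int)))
    (l : List ((Int × Int) × List Int)) (q : (Int × Int) × List Int)
    (hk : d.contains q.1 = true) (hne : ∀ p ∈ l, p.1 ≠ q.1) :
    app d (l ++ [q]) = app d (q :: l) := by
  induction l generalizing d with
  | nil => rfl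
  | cons p l ih =>
      rw [List.cons_append, app_cons, ih _ (by rw [PySem.Dict.contains_modify, hk, Bool.or_true])
            (fun r hr => hne r (List.mem_cons_of_mem _ hr)),
          app_cons, app_cons, app_cons,
          mod_comm _ q.1 p.1 _ _ _ (Ne.symm (hne p List.mem_cons_self)) hk]

-- whole blocks on distinct keys commute when the second block's keys are present
theorem app_comm (d : PySem.Dict (Int × Int) (List (List Int)))
    (l₁ l₂ : List ((Int × Int) × List Int))
    (hk : ∀ q ∈ l₂, d.contains q.1 = true)
    (hne : ∀ p ∈ l₁, ∀ q ∈ l₂, p.1 ≠ q.1) :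
    app d (l₁ ++ l₂) = app d (l₂ ++ l₁) := by
  induction l₂ generalizing d l₁ with
  | nil => simp
  | cons q l₂ ih =>
      have h1 : app d (l₁ ++ q :: l₂) = app (app d (l₁ ++ [q])) l₂ := by
        rw [← app_append]; simp
      rw [h1, app_snoc_comm d l₁ q (hk q List.mem_cons_self)
            (fun p hp => hne p hp q List.mem_cons_self), app_cons, ← app_append,
          ih _ l₁ (fun r hr => by
            rw [PySem.Dict.contains_modify, hk r (List.mem_cons_of_mem _ hr), Bool.or_true])
            (fun p hp r hr => hne p hp r (List.mem_cons_of_mem _ hr)),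
          List.cons_append, app_cons]

-- the value lists appended for keys (n,2) and (n,3)
def x2 (n i : Int) : List Int := [i, n - i - 1]
def ys3 (n i : Int) : List (List Int) :=
  (PySem.List.pyRange 0 (n - i) 1).map (fun j => [i, j, n - i - j - 1])

-- A's op1-loop, with the op2-loop already written as `app`
theorem loopA_merge (n : Int) : ∀ (t : Nat) (a : Int), a + t = n →
    ∀ (d : PySem.Dict (Int × Int) (List (List Int))),
    (PySem.List.pyRange a n 1).foldl (fun d i =>
        app (d.modify (n, 2) [] (· ++ [x2 n i])) ((ys3 n i).map (fun v => ((n, 3), v)))) d =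
    app (app d ((PySem.List.pyRange a n 1).map (fun i => ((n, (2 : Int)), x2 n i))))
        (((PySem.List.pyRange a n 1).flatMap (ys3 n)).map (fun v => ((n, 3), v))) := by
  intro t
  induction t with
  | zero =>
      intro a ha d
      rw [PySem.List.pyRange_one_eq_nil (by omega)]
      rfl
  | succ t ih =>
      intro a ha d
      have hc2 : (d.modify (n, 2) [] (· ++ [x2 n a])).contains (n, 2) = true := by
        rw [PySem.Dict.contains_modify]; simp
      rw [PySem.List.pyRange_one_cons (by omega)]
      simp only [List.foldl_cons, List.map_cons, List.flatMap_cons, List.map_append]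
      rw [ih (a + 1) (by omega) _, app_cons]
      have hcomm := app_comm (d.modify (n, 2) [] (· ++ [x2 n a]))
          ((ys3 n a).map (fun v => ((n, 3), v)))
          ((PySem.List.pyRange (a + 1) n 1).map (fun i => ((n, (2 : Int)), x2 n i)))
          (fun q hq => by obtain ⟨i, _, rfl⟩ := List.mem_map.mp hq; exact hc2)
          (fun p hp q hq => by
            obtain ⟨v, _, rfl⟩ := List.mem_map.mp hp
            obtain ⟨i, _, rfl⟩ := List.mem_map.mp hq
            simp)
      calc app (app (app (d.modify (n, 2) [] (· ++ [x2 n a])) ((ys3 n a).map (fun v => ((n, 3), v))))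
              ((PySem.List.pyRange (a + 1) n 1).map (fun i => ((n, (2 : Int)), x2 n i))))
              (((PySem.List.pyRange (a + 1) n 1).flatMap (ys3 n)).map (fun v => ((n, 3), v)))
          = app (app (d.modify (n, 2) [] (· ++ [x2 n a]))
                ((ys3 n a).map (fun v => ((n, 3), v)) ++
                 (PySem.List.pyRange (a + 1) n 1).map (fun i => ((n, (2 : Int)), x2 n i))))
              (((PySem.List.pyRange (a + 1) n 1).flatMap (ys3 n)).map (fun v => ((n, 3), v))) := by
            rw [app_append]
        _ = app (app (d.modify (n, 2) [] (· ++ [x2 n a]))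
                ((PySem.List.pyRange (a + 1) n 1).map (fun i => ((n, (2 : Int)), x2 n i)) ++
                 (ys3 n a).map (fun v => ((n, 3), v))))
              (((PySem.List.pyRange (a + 1) n 1).flatMap (ys3 n)).map (fun v => ((n, 3), v))) := by
            rw [hcomm]
        _ = app (app (app (d.modify (n, 2) [] (· ++ [x2 n a]))
                ((PySem.List.pyRange (a + 1) n 1).map (fun i => ((n, (2 : Int)), x2 n i))))
                ((ys3 n a).map (fun v => ((n, 3), v))))
              (((PySem.List.pyRange (a + 1) n 1).flatMap (ys3 n)).map (fun v => ((n, 3), v))) := by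
            rw [app_append]
        _ = app (app (d.modify (n, 2) [] (· ++ [x2 n a]))
                ((PySem.List.pyRange (a + 1) n 1).map (fun i => ((n, (2 : Int)), x2 n i))))
              ((ys3 n a).map (fun v => ((n, 3), v)) ++
               ((PySem.List.pyRange (a + 1) n 1).flatMap (ys3 n)).map (fun v => ((n, 3), v))) := by
            rw [app_append]

-- closed forms of comps at k = 1, 2, 3
theorem comps_one (m : Int) (hm : 0 ≤ m) : comps m 1 = [[m]] := by
  rw [comps]; simp [show ¬ m < 0 by omega]

theorem comps_two (m : Int) (hm : 0 ≤ m) :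
    comps m 2 = (PySem.List.pyRange 0 (m + 1) 1).map (fun i => [i, m - i]) := by
  rw [comps]
  simp only [if_neg (show ¬ m < 0 by omega), if_neg (show ¬ (2 : Int) ≤ 1 by omega)]
  rw [List.flatMap_congr (g := fun i => [[i, m - i]]) (fun i hi => by
    have hi' := PySem.List.mem_pyRange_one.mp hi
    rw [show (2 : Int) - 1 = 1 from rfl, comps_one (m - i) (by omega)]
    rfl)]
  exact (List.map_eq_flatMap ..).symm

theorem comps_three (m : Int) (hm : 0 ≤ m) :
    comps m 3 = (PySem.List.pyRange 0 (m + 1) 1).flatMap (fun i =>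
      (PySem.List.pyRange 0 (m - i + 1) 1).map (fun j => [i, j, m - i - j])) := by
  rw [comps]
  simp only [if_neg (show ¬ m < 0 by omega), if_neg (show ¬ (3 : Int) ≤ 1 by omega)]
  refine List.flatMap_congr (fun i hi => ?_)
  have hi' := PySem.List.mem_pyRange_one.mp hi
  rw [show (3 : Int) - 1 = 2 from rfl, comps_two (m - i) (by omega), List.map_map]
  rfl

-- A's op2-loop, as `app`
theorem body3_eq (n i : Int) (D : PySem.Dict (Int × Int) (List (List Int))) :
    (PySem.List.pyRange 0 (n - i) 1).foldl (fun d op2 =>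
      d.modify (n, 3) [] (· ++ [[i, op2, n - i - op2 - 1]])) D =
    app D ((ys3 n i).map (fun v => ((n, 3), v))) := by
  unfold app ys3
  rw [List.map_map, List.foldl_map]
  rfl

-- a fold appending values under one key, as `app`
theorem app_key (k : Int × Int) (vs : List (List Int))
    (D : PySem.Dict (Int × Int) (List (List Int))) :
    vs.foldl (fun d t => d.modify k [] (· ++ [t])) D = app D (vs.map (fun v => (k, v))) := by
  unfold app
  rw [List.foldl_map]

-- the two per-numops bodies agree (for 0 ≤ numops, any starting dict)
theorem step_eq (n : Int) (hn : 0 ≤ n) (d : PySem.Dict (Int × Int) (List (List Int))) :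
    (let d := if n ≠ 0 then d.modify (n, 1) [] (· ++ [[n - 1]]) else d
     (PySem.List.pyRange 0 n 1).foldl (fun d op1 =>
       let d := d.modify (n, 2) [] (· ++ [[op1, n - op1 - 1]])
       (PySem.List.pyRange 0 (n - op1) 1).foldl (fun d op2 =>
         d.modify (n, 3) [] (· ++ [[op1, op2, n - op1 - op2 - 1]])) d) d) =
    ([1, 2, 3] : List Int).foldl (fun d numterms =>
      (comps (n - 1) numterms).foldl (fun d t =>
        d.modify (n, numterms) [] (· ++ [t])) d) d := by
  by_cases hn0 : n = 0
  · subst hn0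
    have hc : ∀ k : Int, comps (0 - 1) k = [] := fun k => by rw [comps]; norm_num
    simp only [PySem.List.pyRange_one_eq_nil (le_refl (0 : Int)), List.foldl_nil,
      List.foldl_cons, hc, if_neg (show ¬ (0 : Int) ≠ 0 by simp)]
  · have hn1 : (0 : Int) ≤ n - 1 := by omega
    simp only [if_pos hn0]
    rw [PySem.List.foldl_congr_mem (PySem.List.pyRange 0 n 1)
        (fun d op1 => List.foldl (fun d op2 =>
            d.modify (n, 3) [] (· ++ [[op1, op2, n - op1 - op2 - 1]]))
          (d.modify (n, 2) [] (· ++ [[op1, n - op1 - 1]])) (PySem.List.pyRange 0 (n - op1)))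
        (fun d i => app (d.modify (n, 2) [] (· ++ [x2 n i]))
          ((ys3 n i).map (fun v => ((n, 3), v))))
        (d.modify (n, 1) [] (· ++ [[n - 1]]))
        (fun acc i _ => body3_eq n i _),
      loopA_merge n n.toNat 0 (by omega)]
    simp only [List.foldl_cons, List.foldl_nil]
    rw [comps_one _ hn1, comps_two _ hn1, comps_three _ hn1, app_key, app_key, app_key]
    have e2 : ((PySem.List.pyRange 0 (n - 1 + 1) 1).map (fun i => [i, n - 1 - i])).map
        (fun v => ((n, (2 : Int)), v)) = (PySem.List.pyRange 0 n 1).map (fun i => ((n, (2 : Int)), x2 n i)) := by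
      rw [show n - 1 + 1 = n by ring, List.map_map]
      refine List.map_congr_left (fun i _ => ?_)
      simp only [Function.comp_apply, x2]
      rw [show n - 1 - i = n - i - 1 by ring]
    have e3 : (((PySem.List.pyRange 0 (n - 1 + 1) 1).flatMap (fun i =>
          (PySem.List.pyRange 0 (n - 1 - i + 1) 1).map (fun j => [i, j, n - 1 - i - j]))).map
        (fun v => ((n, (3 : Int)), v))) =
        ((PySem.List.pyRange 0 n 1).flatMap (ys3 n)).map (fun v => ((n, (3 : Int)), v)) := by
      congr 1
      rw [show n - 1 + 1 = n by ring]
      refine List.flatMap_congr (fun i _ => ?_)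
      unfold ys3
      rw [show n - 1 - i + 1 = n - i by ring]
      refine List.map_congr_left (fun j _ => ?_)
      rw [show n - 1 - i - j = n - i - j - 1 by ring]
    exact congrArg₂ app (congrArg₂ app rfl e2.symm) e3.symm

theorem get_sub_combinations_eq (maxop : Int) :
    get_sub_combinations maxop = get_sub_combinations_alt maxop := by
  unfold get_sub_combinations get_sub_combinations_alt
  rw [PySem.List.foldl_congr_mem _ _
      (fun combo numops => ([1, 2, 3] : List Int).foldl (fun combo numterms =>
        (comps (numops - 1) numterms).foldl (fun combo t =>
          combo.modify (numops, numterms) [] (· ++ [t])) combo) combo) _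
      (fun acc x hx => step_eq x (by
        have := PySem.List.mem_pyRange_one.mp hx; omega) acc)]

-- ===== VERDICT (by name: the statement is the Claim_ definition above) =====
theorem get_sub_combinations_spec : Claim_equal_get_sub_combinations := by
  intro maxop _
  exact get_sub_combinations_eq maxop
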